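-- pv_equiv track=rewrite | github.com/AntonioAbilio/OwlSort-AI | levels/level_generator.py | validate_birds
-- ===== SOURCE A (Python) =====
-- from collections import Counter
--
-- def validate_birds(rgb_list):
--     flat_list = [color for row in rgb_list for color in row]  # Flatten the nested list
--     color_counts = Counter(flat_list)
--
--     # Check if all colors have exactly x occurrences
--     valid = all(count == list(color_counts.values())[0] for count in color_counts.values())
--
--     max_branch_size = 0
--     for branch in rgb_list:
--         if len(branch) > max_branch_size:
--             max_branch_size = len(branch)
--
--     if valid:
--         total_birds_per_color = list(color_counts.values())[0]
--         if total_birds_per_color > max_branch_size: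
--             max_branch_size = total_birds_per_color
--         return len(color_counts), max_branch_size, total_birds_per_color
--     return None
-- ===== SOURCE B (Python) =====
-- def validate_birds(rgb_list):
--     flat = sorted(color for row in rgb_list for color in row)
--     # walk the sorted sequence, collecting the length of each maximal run of equal colors
--     run_lengths = []
--     i = 0
--     n = len(flat)
--     while i < n:
--         j = i
--         while j < n and flat[j] == flat[i]:
--             j += 1
--         run_lengths.append(j - i)
--         i = j
--     target = run_lengths[0]  # IndexError on empty input, as in A
--     if any(r != target for r in run_lengths[1:]):
--         return None
--     max_branch_size = max((len(b) for b in rgb_list), default=0)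
--     if target > max_branch_size:
--         max_branch_size = target
--     return len(run_lengths), max_branch_size, target
-- ===== Notes on version B (the rewrite author's own statement) =====
-- stated objective: alternative
-- what changed: Replaces the Counter hash-count by sorting the flattened list and scanning it once, accumulating the length of each maximal run of equal colors; the number of runs is the distinct-color count and validity means all run lengths equal the first.
import Mathlib
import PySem

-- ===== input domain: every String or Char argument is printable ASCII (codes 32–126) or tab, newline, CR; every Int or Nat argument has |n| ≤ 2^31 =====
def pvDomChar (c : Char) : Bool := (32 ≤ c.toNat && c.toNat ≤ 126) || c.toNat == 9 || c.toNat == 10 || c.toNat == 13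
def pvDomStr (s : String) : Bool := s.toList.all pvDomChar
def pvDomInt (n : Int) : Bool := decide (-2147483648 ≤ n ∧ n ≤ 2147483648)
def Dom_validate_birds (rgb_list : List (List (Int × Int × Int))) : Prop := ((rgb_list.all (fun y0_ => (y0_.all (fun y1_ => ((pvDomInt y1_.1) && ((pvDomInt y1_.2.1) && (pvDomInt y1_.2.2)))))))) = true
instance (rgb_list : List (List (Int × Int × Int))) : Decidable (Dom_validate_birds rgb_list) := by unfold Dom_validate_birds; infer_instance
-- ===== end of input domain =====

-- B replaces A's Counter hash-count by sorting the flattened list and scanning it once,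
-- accumulating the length of each maximal run of equal colors (objective: alternative algorithm).

-- ===== PORT A =====
def validate_birds (rgb_list : List (List (Int × Int × Int))) : Option (Int × Int × Int) :=
  let flat_list := rgb_list.flatMap (fun row => row)
  let color_counts := PySem.Dict.counter flat_list
  let max_branch_size := rgb_list.foldl
    (fun m branch => if (branch.length : Int) > m then (branch.length : Int) else m) 0
  match color_counts.values with
  | [] => none   -- Python: valid is vacuously True, then list(values)[0] raises IndexError; excluded by Pre_
  | v0 :: _ =>
    let valid := color_counts.values.all (fun count => count == v0)
    if valid then
      let total_birds_per_color := v0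
      let max_branch_size := if total_birds_per_color > max_branch_size then total_birds_per_color else max_branch_size
      some ((color_counts.size : Int), max_branch_size, total_birds_per_color)
    else none

-- ===== PORT B =====
-- Python's tuple comparison is lexicographic: sort key into the lexicographic order on Int × Int × Int.
def pvKey (t : Int × Int × Int) : Lex (Int × Lex (Int × Int)) := toLex (t.1, toLex (t.2.1, t.2.2))

-- the inner while loop of Source B: extend the current run of x (length n so far) through the rest
def pvRunAux (x : Int × Int × Int) (n : Int) : List (Int × Int × Int) → List Int
  | [] => [n]
  | y :: ys => if y == x then pvRunAux x (n + 1) ys else n :: pvRunAux y 1 ys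

-- the outer while loop of Source B: run lengths of the maximal runs of equal elements
def pvRunLens : List (Int × Int × Int) → List Int
  | [] => []
  | x :: xs => pvRunAux x 1 xs

def validate_birds_alt (rgb_list : List (List (Int × Int × Int))) : Option (Int × Int × Int) :=
  let flat := PySem.List.sorted (rgb_list.flatMap (fun row => row)) pvKey
  match pvRunLens flat with
  | [] => none   -- Python: run_lengths[0] raises IndexError; excluded by Pre_
  | t :: rest =>
    if rest.any (fun r => r != t) then none
    else
      let max_branch_size := PySem.List.maxD (rgb_list.map (fun b => (b.length : Int))) (fun x => x) 0
      some (((t :: rest).length : Int),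
            (if t > max_branch_size then t else max_branch_size), t)

-- ===== PRECONDITION & SPEC =====
-- Pre_ excludes exactly the inputs whose flattening is empty: there both Pythons raise IndexError.
def Pre_validate_birds (rgb_list : List (List (Int × Int × Int))) : Prop :=
  rgb_list.flatMap (fun row => row) ≠ []
instance (rgb_list : List (List (Int × Int × Int))) : Decidable (Pre_validate_birds rgb_list) := by
  unfold Pre_validate_birds; infer_instance

def pvWitness_validate_birds : (List (List (Int × Int × Int))) := [[(1, 2, 3)]]

def Spec_validate_birds (rgb_list : List (List (Int × Int × Int))) (out : Option (Int × Int × Int)) : Prop := out = validate_birds_alt rgb_list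
instance (rgb_list : List (List (Int × Int × Int))) (out : Option (Int × Int × Int)) : Decidable (Spec_validate_birds rgb_list out) := by unfold Spec_validate_birds; infer_instance

-- ===== CLAIM (what is proved, stated in full; the proofs are below) =====
def Claim_equal_validate_birds : Prop := ∀ (rgb_list : List (List (Int × Int × Int))), Dom_validate_birds rgb_list → Pre_validate_birds rgb_list → Spec_validate_birds rgb_list (validate_birds rgb_list)

-- ===== LEMMAS AND PROOFS =====

-- the sort key is injective
theorem pvKey_inj {a b : Int × Int × Int} (h : pvKey a = pvKey b) : a = b := by
  obtain ⟨a1, a2, a3⟩ := a; obtain ⟨b1, b2, b3⟩ := b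
  simpa [pvKey, Prod.ext_iff] using h

-- x does not reappear after its run in a key-sorted list
theorem pvNotMem_dropWhile {x : Int × Int × Int} {xs : List (Int × Int × Int)}
    (h : (x :: xs).Pairwise (fun a b => pvKey a ≤ pvKey b)) :
    x ∉ xs.dropWhile (fun y => y == x) := by
  induction xs with
  | nil => simp
  | cons y ys ih =>
    rcases List.pairwise_cons.1 h with ⟨hx, hys⟩
    by_cases hyx : y = x
    · subst hyx
      simpa using ih (List.pairwise_cons.2 ⟨fun z hz => hx z (List.mem_cons_of_mem _ hz),
        (List.pairwise_cons.1 hys).2⟩)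
    · rw [List.dropWhile_cons_of_neg (by simpa using hyx)]
      intro hmem
      rcases List.mem_cons.1 hmem with h1 | h1
      · exact hyx h1.symm
      · have h2 := (List.pairwise_cons.1 hys).1 x h1
        have h3 := hx y (List.mem_cons_self ..)
        exact hyx (pvKey_inj (le_antisymm h2 h3))

-- the inner-run recursion: one run of x, then the runs of the remainder
theorem pvRunAux_eq {x : Int × Int × Int} {xs : List (Int × Int × Int)}
    (h : (x :: xs).Pairwise (fun a b => pvKey a ≤ pvKey b)) (n : Int) :
    pvRunAux x n xs = (n + (xs.count x : Int)) :: pvRunLens (xs.dropWhile (fun y => y == x)) := by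
  induction xs generalizing n with
  | nil => simp [pvRunAux, pvRunLens]
  | cons y ys ih =>
    rcases List.pairwise_cons.1 h with ⟨hx, hys⟩
    by_cases hyx : y = x
    · subst hyx
      rw [pvRunAux, if_pos (by simp)]
      rw [ih (List.pairwise_cons.2 ⟨fun z hz => hx z (List.mem_cons_of_mem _ hz),
        (List.pairwise_cons.1 hys).2⟩) (n + 1)]
      simp
      ring_nf
    · rw [pvRunAux, if_neg (by simpa using hyx)]
      have hnot : x ∉ ys := by
        intro h1
        have h2 := (List.pairwise_cons.1 hys).1 x h1
        have h3 := hx y (List.mem_cons_self ..)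
        exact hyx (pvKey_inj (le_antisymm h2 h3))
      rw [List.dropWhile_cons_of_neg (by simpa using hyx)]
      simp [pvRunLens, hyx, List.count_eq_zero.2 hnot]

-- Set.ofList accumulation: a fresh head stays in front
theorem pvFoldl_add_cons {x : Int × Int × Int} {r : List (Int × Int × Int)}
    (hx : x ∉ r) (s : List (Int × Int × Int)) :
    r.foldl PySem.Set.add (x :: s) = x :: r.foldl PySem.Set.add s := by
  induction r generalizing s with
  | nil => rfl
  | cons y ys ih =>
    have hyx : (y == x) = false := by
      simp only [beq_eq_false_iff_ne, ne_eq]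
      intro h; exact hx (h ▸ List.mem_cons_self ..)
    have hnot : x ∉ ys := fun h => hx (List.mem_cons_of_mem _ h)
    simp only [List.foldl_cons]
    have : PySem.Set.add (x :: s) y = x :: PySem.Set.add s y := by
      simp only [PySem.Set.add, PySem.Set.contains, List.contains_cons]
      rw [show (y == x) = false from hyx]
      simp only [Bool.false_or]
      split <;> rfl
    rw [this, ih hnot]

-- adding copies of x into a set already containing x does nothing
theorem pvFoldl_add_replicate {x : Int × Int × Int} {t : List (Int × Int × Int)}
    (ht : ∀ y ∈ t, y = x) {s : List (Int × Int × Int)} (hs : x ∈ s) :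
    t.foldl PySem.Set.add s = s := by
  induction t with
  | nil => rfl
  | cons y ys ih =>
    have hy : y = x := ht y (List.mem_cons_self ..)
    simp only [List.foldl_cons]
    have : PySem.Set.add s y = s := by
      simp only [PySem.Set.add, PySem.Set.contains]
      rw [if_pos (List.contains_iff_mem.2 (hy ▸ hs))]
    rw [this]
    exact ih (fun z hz => ht z (List.mem_cons_of_mem _ hz))

-- main characterisation: the runs of a key-sorted list are its distinct elements with their counts
theorem pvRunLens_eq_aux (fuel : Nat) : ∀ (s : List (Int × Int × Int)), s.length ≤ fuel →
    s.Pairwise (fun a b => pvKey a ≤ pvKey b) →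
    pvRunLens s = (PySem.Set.ofList s).map (fun k => (s.count k : Int)) := by
  induction fuel with
  | zero =>
    intro s hle _
    rw [List.length_eq_zero_iff.1 (Nat.le_zero.1 hle)]
    rfl
  | succ m ih =>
    intro s hle h
    match s, h with
    | [], _ => rfl
    | x :: xs, h =>
      set r := xs.dropWhile (fun y => y == x) with hr
      have hxr : x ∉ r := pvNotMem_dropWhile h
      have hsplit : xs.takeWhile (fun y => y == x) ++ r = xs := List.takeWhile_append_dropWhile
      have htake : ∀ y ∈ xs.takeWhile (fun y => y == x), y = x := by
        intro y hy
        have := List.mem_takeWhile_imp hy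
        simpa using this
      have hrsub : r.Sublist (x :: xs) :=
        (List.dropWhile_sublist _).trans (List.sublist_cons_self _ _)
      have hrs : r.Pairwise (fun a b => pvKey a ≤ pvKey b) := h.sublist hrsub
      have hlen : r.length ≤ m := by
        have hx2 : r.length ≤ xs.length := (List.dropWhile_sublist _).length_le
        simp only [List.length_cons] at hle; omega
      -- distinct elements: x followed by the distinct elements of the remainder
      have hof : PySem.Set.ofList (x :: xs) = x :: PySem.Set.ofList r := by
        rw [PySem.Set.ofList_eq_foldl, PySem.Set.ofList_eq_foldl]
        have h0 : List.foldl PySem.Set.add [] (x :: xs) = List.foldl PySem.Set.add [x] xs := by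
          simp [PySem.Set.add, PySem.Set.contains]
        rw [h0, ← hsplit, List.foldl_append,
          pvFoldl_add_replicate htake (List.mem_singleton.2 rfl),
          show ([x] : List (Int × Int × Int)) = x :: [] from rfl,
          pvFoldl_add_cons hxr]
      rw [show pvRunLens (x :: xs) = pvRunAux x 1 xs from rfl, pvRunAux_eq h 1, hof,
        ih r hlen hrs]
      simp only [List.map_cons, List.count_cons_self]
      refine List.cons_eq_cons.2 ⟨?_, ?_⟩
      · push_cast; ring
      · apply List.map_congr_left
        intro k hk
        have hkr : k ∈ r := (PySem.Set.mem_ofList r k).1 hk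
        have hkx : k ≠ x := fun h => hxr (h ▸ hkr)
        have hcx : (xs.takeWhile (fun y => y == x)).count k = 0 :=
          List.count_eq_zero.2 (fun hm => hkx (htake k hm))
        have hcc : List.count k (x :: xs) = List.count k r := by
          rw [← hsplit]
          simp [List.count_append, hcx, Ne.symm hkx]
        rw [hcc]

theorem pvRunLens_eq (s : List (Int × Int × Int))
    (h : s.Pairwise (fun a b => pvKey a ≤ pvKey b)) :
    pvRunLens s = (PySem.Set.ofList s).map (fun k => (s.count k : Int)) :=
  pvRunLens_eq_aux s.length s le_rfl h

-- "every element equals the head" is invariant under permutation (with the heads identified)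
theorem pvAllEqHead_perm {l₁ l₂ : List Int} (hp : l₁.Perm l₂)
    {a b : Int} {t₁ t₂ : List Int} (h1 : l₁ = a :: t₁) (h2 : l₂ = b :: t₂) :
    t₁.all (fun c => c == a) = t₂.all (fun c => c == b) := by
  subst h1; subst h2
  have dir : ∀ {m₁ m₂ : List Int} (hq : m₁.Perm m₂) {c d : Int} {u₁ u₂ : List Int},
      m₁ = c :: u₁ → m₂ = d :: u₂ → u₁.all (fun e => e == c) = true →
      u₂.all (fun e => e == d) = true := by
    intro m₁ m₂ hq c d u₁ u₂ e1 e2 hall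
    subst e1; subst e2
    have h1' : ∀ y ∈ c :: u₁, y = c := by
      intro y hy
      rcases List.mem_cons.1 hy with h | h
      · exact h
      · simpa using List.all_eq_true.1 hall y h
    have hdc : d = c := h1' d (hq.mem_iff.2 (List.mem_cons_self ..))
    rw [List.all_eq_true]
    intro y hy
    have : y = c := h1' y (hq.mem_iff.2 (List.mem_cons_of_mem _ hy))
    simp [this, hdc]
  cases hall1 : t₁.all (fun c => c == a) with
  | true => exact (dir hp rfl rfl hall1).symm
  | false =>
    cases hall2 : t₂.all (fun c => c == b) with
    | true => exact absurd (dir hp.symm rfl rfl hall2) (by simp [hall1])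
    | false => rfl

-- A's if-based running max equals a max-fold over the mapped lengths
theorem pvMaxFold (rgb_list : List (List (Int × Int × Int))) :
    rgb_list.foldl (fun m branch => if (branch.length : Int) > m then (branch.length : Int) else m) 0 =
      (rgb_list.map (fun b => (b.length : Int))).foldl max 0 := by
  rw [List.foldl_map]
  apply PySem.List.foldl_congr_mem
  intro acc x _
  split_ifs <;> omega

-- B's max(..., default=0) equals the same max-fold
theorem pvMaxD_eq (l : List Int) (hl : ∀ y ∈ l, 0 ≤ y) :
    PySem.List.maxD l (fun x => x) 0 = l.foldl max 0 := by
  cases l with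
  | nil => rfl
  | cons z t =>
    have := PySem.List.max?_id_cons z t
    simp only [PySem.List.maxD, this, Option.getD_some, List.foldl_cons]
    have hz : max 0 z = z := max_eq_right (hl z (List.mem_cons_self ..))
    rw [hz]

theorem validate_birds_eq_alt (rgb_list : List (List (Int × Int × Int)))
    (hpre : rgb_list.flatMap (fun row => row) ≠ []) :
    validate_birds rgb_list = validate_birds_alt rgb_list := by
  unfold validate_birds validate_birds_alt
  set flat := rgb_list.flatMap (fun row => row) with hflat
  set s := PySem.List.sorted flat pvKey with hs
  have hperm : s.Perm flat := PySem.List.sorted_perm flat pvKey false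
  have hpair : s.Pairwise (fun a b => pvKey a ≤ pvKey b) := PySem.List.sorted_pairwise flat pvKey
  have hrun : pvRunLens s = (PySem.Set.ofList s).map (fun k => (s.count k : Int)) :=
    pvRunLens_eq s hpair
  -- counts in s equal counts in flat
  have hcnt : ∀ k, s.count k = flat.count k := fun k => hperm.count_eq k
  have hrun' : pvRunLens s = (PySem.Set.ofList s).map (fun k => (flat.count k : Int)) := by
    rw [hrun]; exact List.map_congr_left (fun k _ => by rw [hcnt k])
  -- the two dedup lists are permutations of each other
  have hdperm : (PySem.Set.ofList flat).Perm (PySem.Set.ofList s) :=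
    (List.perm_ext_iff_of_nodup (PySem.Set.nodup_ofList flat) (PySem.Set.nodup_ofList s)).2
      (fun a => by rw [PySem.Set.mem_ofList, PySem.Set.mem_ofList, hperm.mem_iff])
  have hlperm : ((PySem.Set.ofList flat).map (fun k => (flat.count k : Int))).Perm (pvRunLens s) := by
    rw [hrun']; exact hdperm.map _
  -- A's values list is the dedup of flat mapped to counts
  have hvals : (PySem.Dict.counter flat).values =
      (PySem.Set.ofList flat).map (fun k => (flat.count k : Int)) := by
    simp [PySem.Dict.values, PySem.Dict.items_counter, List.map_map]
  have hsize : (PySem.Dict.counter flat).size = (PySem.Set.ofList flat).length := by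
    simp [PySem.Dict.size, PySem.Dict.items_counter]
  simp only [hvals, hsize, pvMaxFold]
  -- nonempty on both sides
  have hsne : s ≠ [] := by
    rw [hs, Ne, PySem.List.sorted_eq_nil_iff]; exact hpre
  cases hA : (PySem.Set.ofList flat).map (fun k => (flat.count k : Int)) with
  | nil =>
    exfalso
    cases hf : flat with
    | nil => exact hpre hf
    | cons x xs =>
      have hx : x ∈ PySem.Set.ofList flat := (PySem.Set.mem_ofList flat x).2 (by simp [hf])
      have : ((flat.count x : Int)) ∈ (PySem.Set.ofList flat).map (fun k => (flat.count k : Int)) :=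
        List.mem_map_of_mem hx
      rw [hA] at this; simp at this
  | cons v0 tA =>
    cases hB : pvRunLens s with
    | nil =>
      exfalso
      have := hlperm.length_eq
      rw [hA, hB] at this; simp at this
    | cons t rest =>
      have hperm2 : (v0 :: tA).Perm (t :: rest) := by rw [← hA, ← hB]; exact hlperm
      have hallEq : tA.all (fun c => c == v0) = rest.all (fun c => c == t) :=
        pvAllEqHead_perm hperm2 rfl rfl
      have hany : (rest.any fun r => r != t) = !rest.all (fun c => c == t) := by
        simp only [bne]; exact List.not_all_eq_any_not.symm
      simp only [List.all_cons, BEq.refl, Bool.true_and, hallEq, hany]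
      cases hvalid : rest.all (fun c => c == t) with
      | false => simp
      | true =>
        simp only [Bool.not_true, Bool.false_eq_true, if_false, if_true]
        -- all elements of both lists equal both heads, so the heads agree
        have hresteq : ∀ y ∈ t :: rest, y = t := by
          intro y hy
          rcases List.mem_cons.1 hy with h | h
          · exact h
          · simpa using List.all_eq_true.1 hvalid y h
        have hv0t : v0 = t := hresteq v0 (hperm2.mem_iff.1 (List.mem_cons_self ..))
        have hlen : (PySem.Set.ofList flat).length = (t :: rest).length := by
          have h1 := hlperm.length_eq
          rw [hB] at h1
          simpa using h1
        have hmax : (rgb_list.map (fun b => (b.length : Int))).foldl max 0 =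
            PySem.List.maxD (rgb_list.map (fun b => (b.length : Int))) (fun x => x) 0 := by
          rw [pvMaxD_eq]
          intro y hy
          rcases List.mem_map.1 hy with ⟨b, _, hb⟩
          rw [← hb]; positivity
        rw [hv0t, hlen, hmax]

-- ===== VERDICT (by name: the statement is the Claim_ definition above) =====
theorem validate_birds_spec : Claim_equal_validate_birds := by
  intro rgb_list _ hpre
  unfold Spec_validate_birds
  exact validate_birds_eq_alt rgb_list hpre
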